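-- pv_equiv track=rewrite | github.com/Oddlybird/Dancestry | trolldeets.py | bloodsort
-- ===== SOURCE A (Python) =====
-- def bloodsort(blood):
--     a = 0  # count the number of letters stripped out
--     sortedblood = ""  # sorted blood code
--     for arb in blood:  # for each letter...
--         if arb == "R":
--             sortedblood = sortedblood + "R"
--             a = a + 1
--         if a == len(blood) + 1:
--             break
--     for arb in blood:  # for each letter...
--         if arb == "r":
--             sortedblood = sortedblood + "r"
--             a = a + 1
--         if a == len(blood) + 1:
--             break
--     for arb in blood:  # for each letter...
--         if arb == "G":
--             sortedblood = sortedblood + "G"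
--             a = a + 1
--         if a == len(blood) + 1:
--             break
--     for arb in blood:  # for each letter...
--         if arb == "g":
--             sortedblood = sortedblood + "g"
--             a = a + 1
--         if a == len(blood) + 1:
--             break
--     for arb in blood:  # for each letter...
--         if arb == "B":
--             sortedblood = sortedblood + "B"
--             a = a + 1
--         if a == len(blood) + 1:
--             break
--     for arb in blood:  # for each letter...
--         if arb == "b":
--             sortedblood = sortedblood + "b"
--             a = a + 1
--         if a == len(blood) + 1:
--             break
--     return sortedblood
-- ===== SOURCE B (Python) =====
-- def bloodsort(blood):
--     counts = {}
--     for ch in blood: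
--         counts[ch] = counts.get(ch, 0) + 1
--     return "".join(ch * counts.get(ch, 0) for ch in "RrGgBb")
-- ===== Notes on version B (the rewrite author's own statement) =====
-- stated objective: faster
-- what changed: Six full scans of the string (one per target letter, each with a dead break counter) are replaced by one counting pass building a dict, followed by a single emit over the six target letters in fixed order.
import Mathlib
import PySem

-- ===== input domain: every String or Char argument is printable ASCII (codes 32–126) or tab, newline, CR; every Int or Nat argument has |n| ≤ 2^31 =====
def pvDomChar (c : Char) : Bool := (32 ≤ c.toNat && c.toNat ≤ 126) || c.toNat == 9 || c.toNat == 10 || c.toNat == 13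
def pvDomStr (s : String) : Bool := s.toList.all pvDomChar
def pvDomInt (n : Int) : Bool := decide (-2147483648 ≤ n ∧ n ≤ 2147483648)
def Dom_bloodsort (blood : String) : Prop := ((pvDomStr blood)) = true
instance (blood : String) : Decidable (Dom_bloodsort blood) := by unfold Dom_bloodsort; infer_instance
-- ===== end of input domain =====

-- B replaces A's six full scans (one per target letter, with A's never-firing break counter)
-- by one counting pass over the string plus a single emit over the six letters in fixed order (measured faster).

-- ===== PORT A =====
-- one iteration of a 'for arb in blood' loop of A, for target letter t;
-- state = (broke?, a, sortedblood); the 'if a == len(blood)+1: break' is the Bool flag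
def pvStepA (t : Char) (n : Int) (st : Bool × Int × List Char) (arb : Char) : Bool × Int × List Char :=
  if st.1 then st
  else
    let a := if arb = t then st.2.1 + 1 else st.2.1
    let s := if arb = t then st.2.2 ++ [t] else st.2.2
    (decide (a = n + 1), a, s)

-- one whole 'for arb in blood' loop of A (the break flag is fresh in each loop)
def pvLoopA (cs : List Char) (n : Int) (t : Char) (st : Int × List Char) : Int × List Char :=
  let r := cs.foldl (pvStepA t n) (false, st.1, st.2)
  (r.2.1, r.2.2)

def bloodsort (blood : String) : String :=
  let cs := blood.toList
  let n : Int := cs.length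
  let st := pvLoopA cs n 'R' (0, [])
  let st := pvLoopA cs n 'r' st
  let st := pvLoopA cs n 'G' st
  let st := pvLoopA cs n 'g' st
  let st := pvLoopA cs n 'B' st
  let st := pvLoopA cs n 'b' st
  String.mk st.2

-- ===== PORT B =====
def bloodsort_alt (blood : String) : String :=
  let counts : PySem.Dict Char Int :=
    blood.toList.foldl (fun d c => d.insert c (d.getD c 0 + 1)) PySem.Dict.empty
  String.mk (("RrGgBb".toList).flatMap (fun c => List.replicate (counts.getD c 0).toNat c))

-- ===== PRECONDITION & SPEC =====
def Spec_bloodsort (blood : String) (out : String) : Prop := out = bloodsort_alt blood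
instance (blood : String) (out : String) : Decidable (Spec_bloodsort blood out) := by unfold Spec_bloodsort; infer_instance

-- ===== CLAIM (what is proved, stated in full; the proofs are below) =====
def Claim_equal_bloodsort : Prop := ∀ (blood : String), Dom_bloodsort blood → Spec_bloodsort blood (bloodsort blood)

-- ===== LEMMAS AND PROOFS =====

-- A's break condition a = n+1 can never fire while a + (remaining matches) ≤ n,
-- so each of A's loops just appends (count t) copies of t and adds that to a.
theorem pvStepA_false (t : Char) (n a : Int) (s : List Char) (arb : Char) :
    pvStepA t n (false, a, s) arb
      = (decide ((if arb = t then a + 1 else a) = n + 1),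
         if arb = t then a + 1 else a, if arb = t then s ++ [t] else s) := by
  simp [pvStepA]

theorem pvLoopA_foldl (t : Char) (n : Int) :
    ∀ (cs : List Char) (a : Int) (s : List Char), a + (cs.count t : Int) ≤ n →
      cs.foldl (pvStepA t n) (false, a, s)
        = (false, a + cs.count t, s ++ List.replicate (cs.count t) t) := by
  intro cs
  induction cs with
  | nil => intro a s h; simp
  | cons c cs ih =>
    intro a s h
    have hcnt : (0:Int) ≤ (cs.count t : Int) := Int.natCast_nonneg _
    rw [List.foldl_cons, pvStepA_false]
    by_cases hc : c = t
    · subst hc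
      have h1 : a + 1 + (cs.count c : Int) ≤ n := by
        rw [List.count_cons_self] at h; push_cast at h; omega
      have hne : decide (a + 1 = n + 1) = false := by
        simp only [decide_eq_false_iff_not]; omega
      simp only [eq_self_iff_true, if_true, hne]
      rw [ih (a + 1) (s ++ [c]) h1, List.count_cons_self]
      refine Prod.ext rfl (Prod.ext ?_ ?_)
      · push_cast; ring
      · simp [List.replicate_succ]
    · have h1 : a + (cs.count t : Int) ≤ n := by
        rw [List.count_cons_of_ne hc] at h; exact h
      have hne : decide (a = n + 1) = false := by
        simp only [decide_eq_false_iff_not]; omega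
      simp only [if_neg hc, hne]
      rw [ih a s h1, List.count_cons_of_ne hc]

theorem pvLoopA_eq (cs : List Char) (n : Int) (t : Char) (a : Int) (s : List Char)
    (h : a + (cs.count t : Int) ≤ n) :
    pvLoopA cs n t (a, s) = (a + cs.count t, s ++ List.replicate (cs.count t) t) := by
  simp [pvLoopA, pvLoopA_foldl t n cs a s h]

-- the six letters are distinct, so the sum of their counts is at most the length
theorem pvCountSum (cs : List Char) :
    cs.count 'R' + cs.count 'r' + cs.count 'G' + cs.count 'g' + cs.count 'B' + cs.count 'b'
      ≤ cs.length := by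
  induction cs with
  | nil => simp
  | cons c cs ih =>
    simp only [List.count_cons, List.length_cons]
    by_cases h1 : c = 'R' <;> by_cases h2 : c = 'r' <;> by_cases h3 : c = 'G' <;>
      by_cases h4 : c = 'g' <;> by_cases h5 : c = 'B' <;> by_cases h6 : c = 'b' <;>
      simp_all <;> omega

theorem pvCountsGetD (cs : List Char) (c : Char) :
    (cs.foldl (fun d c => d.insert c (d.getD c 0 + 1)) PySem.Dict.empty).getD c 0
      = (cs.count c : Int) := by
  rw [PySem.Dict.foldl_insert_getD_add_one_eq_counter, PySem.Dict.getD_counter]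

-- ===== VERDICT (by name: the statement is the Claim_ definition above) =====
theorem bloodsort_spec : Claim_equal_bloodsort := by
  intro blood _
  unfold Spec_bloodsort bloodsort bloodsort_alt
  set cs := blood.toList with hcs
  dsimp only
  have hsum := pvCountSum cs
  rw [pvLoopA_eq cs _ 'R' 0 [] (by omega)]
  rw [pvLoopA_eq cs _ 'r' _ _ (by omega)]
  rw [pvLoopA_eq cs _ 'G' _ _ (by omega)]
  rw [pvLoopA_eq cs _ 'g' _ _ (by omega)]
  rw [pvLoopA_eq cs _ 'B' _ _ (by omega)]
  rw [pvLoopA_eq cs _ 'b' _ _ (by omega)]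
  simp only [pvCountsGetD, Int.toNat_natCast]
  simp [List.flatMap]
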